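-- pv_equiv track=rewrite | github.com/lol1boy/lab2 | main.py | finite_differences
-- ===== SOURCE A (Python) =====
-- def finite_differences(y):
--     n = len(y)
--     delta = list(y)
--     coeffs = [delta[0]]
--     for k in range(1, n):
--         delta = [delta[i+1] - delta[i] for i in range(len(delta)-1)]
--         coeffs.append(delta[0])
--     return coeffs
-- ===== SOURCE B (Python) =====
-- def finite_differences(y):
--     d = list(y)
--     n = len(d)
--     for k in range(1, n):
--         for i in range(n - 1, k - 1, -1):
--             d[i] = d[i] - d[i - 1]
--     return d
-- ===== Notes on version B (the rewrite author's own statement) =====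
-- stated objective: alternative
-- what changed: Replaces A's loop that rebuilds a fresh difference list each level and appends its head to a separate coefficient list by the classic in-place Newton triangle: one array updated backwards in place (each cell minus its left neighbour) whose final contents are the coefficients.
import Mathlib
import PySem

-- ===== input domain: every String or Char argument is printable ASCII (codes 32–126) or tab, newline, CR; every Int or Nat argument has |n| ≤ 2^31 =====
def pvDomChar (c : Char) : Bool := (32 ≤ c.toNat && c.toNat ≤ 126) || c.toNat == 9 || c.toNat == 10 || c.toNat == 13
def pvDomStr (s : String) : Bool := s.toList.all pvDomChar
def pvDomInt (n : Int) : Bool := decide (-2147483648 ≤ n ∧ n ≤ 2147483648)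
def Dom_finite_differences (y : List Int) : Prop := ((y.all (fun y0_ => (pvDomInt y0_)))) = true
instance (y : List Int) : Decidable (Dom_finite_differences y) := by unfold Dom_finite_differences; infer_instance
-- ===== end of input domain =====

-- B replaces A's rebuild-a-new-difference-list loop by the classic in-place Newton
-- triangle (one array, backward inner updates, the array is the result); same cost.


-- ===== PORT A =====
-- the loop body of A's 'for k in range(1, n)', named for readability:
-- delta = [delta[i+1] - delta[i] for i in range(len(delta)-1)]; coeffs.append(delta[0])
-- (list indexing is ported with pyGetD (default 0): inside Pre_ every index is in range)
def pvStep (st : List Int × List Int) (_ : Int) : List Int × List Int :=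
  let delta := st.1
  let delta' := (PySem.List.pyRange 0 ((delta.length : Int) - 1) 1).map
    (fun i => PySem.List.pyGetD delta (i + 1) 0 - PySem.List.pyGetD delta i 0)
  (delta', st.2 ++ [PySem.List.pyGetD delta' 0 0])

def finite_differences (y : List Int) : List Int :=
  let n : Int := (y.length : Int)
  let delta : List Int := y
  let coeffs : List Int := [PySem.List.pyGetD delta 0 0]
  ((PySem.List.pyRange 1 n 1).foldl pvStep (delta, coeffs)).2

-- ===== PORT B =====
-- the in-place update of Source B's inner loop: subtract the left neighbour into position i
def pvIStep (d : List Int) (i : Int) : List Int :=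
  PySem.List.pySetD d i (PySem.List.pyGetD d i 0 - PySem.List.pyGetD d (i - 1) 0)

def finite_differences_alt (y : List Int) : List Int :=
  let d : List Int := y
  let n : Int := (d.length : Int)
  (PySem.List.pyRange 1 n 1).foldl
    (fun d k => (PySem.List.pyRange (n - 1) (k - 1) (-1)).foldl pvIStep d) d

-- ===== PRECONDITION & SPEC =====
-- A indexes the first element of delta, so on the empty list it raises IndexError; Pre_ excludes it.
def Pre_finite_differences (y : List Int) : Prop := y ≠ []
instance (y : List Int) : Decidable (Pre_finite_differences y) := by unfold Pre_finite_differences; infer_instance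
def pvWitness_finite_differences : List Int := [3, 1, 4, 1]

def Spec_finite_differences (y : List Int) (out : List Int) : Prop := out = finite_differences_alt y
instance (y : List Int) (out : List Int) : Decidable (Spec_finite_differences y out) := by unfold Spec_finite_differences; infer_instance

-- ===== CLAIM (what is proved, stated in full; the proofs are below) =====
def Claim_equal_finite_differences : Prop := ∀ (y : List Int), Dom_finite_differences y → Pre_finite_differences y → Spec_finite_differences y (finite_differences y)

-- ===== LEMMAS AND PROOFS =====

-- adjacent differences: the common mathematical spec both ports are reduced to
def pvPairDiffs : List Int → List Int
  | a :: b :: t => (b - a) :: pvPairDiffs (b :: t)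
  | _ => []

theorem pvPairDiffs_length (l : List Int) : (pvPairDiffs l).length = l.length - 1 := by
  match l with
  | [] => rfl
  | [a] => rfl
  | a :: b :: t => simp only [pvPairDiffs, List.length_cons, pvPairDiffs_length (b :: t)]; omega

-- the heads of the iterated difference lists (top edge of the triangle)
def pvHeads : List Int → List Int
  | [] => []
  | [a] => [a]
  | a :: b :: t => a :: pvHeads (pvPairDiffs (a :: b :: t))
termination_by l => l.length
decreasing_by simp only [pvPairDiffs_length, List.length_cons]; omega

theorem heads_single (a : Int) : pvHeads [a] = [a] := by
  simp [pvHeads]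

theorem heads_eq3 (a b : Int) (t : List Int) :
    pvHeads (a :: b :: t) = a :: pvHeads (pvPairDiffs (a :: b :: t)) := by
  simp [pvHeads]

theorem heads_cons (a : Int) (t : List Int) :
    pvHeads (a :: t) = a :: (pvHeads (a :: t)).tail := by
  cases t <;> simp [pvHeads]

theorem pyGetD_succ (x : Int) (xs : List Int) (i : Int) (h : 0 ≤ i) :
    PySem.List.pyGetD (x :: xs) (i + 1) 0 = PySem.List.pyGetD xs i 0 := by
  rcases Int.eq_ofNat_of_zero_le h with ⟨k, rfl⟩
  have hk : ((k : Int) + 1) = ((k + 1 : Nat) : Int) := by push_cast; ring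
  rw [hk, PySem.List.pyGetD_natCast, PySem.List.pyGetD_natCast]
  simp

theorem headI_pyGetD (d : List Int) : PySem.List.pyGetD d 0 0 = d.headI := by
  cases d <;> simp [PySem.List.pyGetD, PySem.List.pyGet?, PySem.List.pyIdx?]

-- ===== A-side: the loop of A produces the heads list =====

theorem diff_map_eq (d : List Int) :
    (PySem.List.pyRange 0 ((d.length : Int) - 1) 1).map
        (fun i => PySem.List.pyGetD d (i + 1) 0 - PySem.List.pyGetD d i 0)
      = pvPairDiffs d := by
  match d with
  | [] => rfl
  | [a] => rfl
  | a :: b :: t =>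
    have h1 : ((a :: b :: t).length : Int) - 1 = ((b :: t).length : Int) := by simp
    rw [h1, PySem.List.pyRange_one_cons (by simp)]
    have h2 : PySem.List.pyRange (0 + 1) ((b :: t).length : Int) 1
        = (PySem.List.pyRange 0 (((b :: t).length : Int) - 1) 1).map (· + 1) := by
      rw [PySem.List.pyRange_one, PySem.List.pyRange_one]
      simp [List.map_map, Function.comp]
      ring_nf
      intros
      trivial
    simp only [List.map_cons, h2, List.map_map]
    rw [pvPairDiffs]
    congr 1
    · rw [pyGetD_succ a (b :: t) 0 le_rfl, headI_pyGetD, headI_pyGetD]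
      simp
    · rw [← diff_map_eq (b :: t)]
      apply List.map_congr_left
      intro i hi
      have hmem := (PySem.List.mem_pyRange_one).1 hi
      simp only [Function.comp_apply]
      rw [pyGetD_succ a (b :: t) (i + 1) (by omega), pyGetD_succ a (b :: t) i hmem.1]

theorem loop_inv (m : Nat) (d acc : List Int) (hd : d.length = m + 1) (l : List Int)
    (hl : l.length = m) :
    (l.foldl pvStep (d, acc)).2 = acc ++ (pvHeads d).tail := by
  induction m generalizing d acc l with
  | zero =>
    rcases List.length_eq_zero_iff.mp hl with rfl
    match d, hd with
    | [a], _ => simp [heads_single]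
  | succ m ih =>
    match l, hl with
    | x :: l, hl =>
      have hl' : l.length = m := by simpa using hl
      have hstep : pvStep (d, acc) x
          = (pvPairDiffs d, acc ++ [(pvPairDiffs d).headI]) := by
        simp [pvStep, diff_map_eq, headI_pyGetD]
      have hdl : (pvPairDiffs d).length = m + 1 := by
        rw [pvPairDiffs_length, hd]; omega
      rw [List.foldl_cons, hstep, ih _ _ hdl _ hl']
      match d, hd with
      | a :: b :: t, _ =>
        obtain ⟨c, u, hcu⟩ : ∃ c u, pvPairDiffs (a :: b :: t) = c :: u := by
          cases hpd : pvPairDiffs (a :: b :: t) with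
          | nil => have := pvPairDiffs_length (a :: b :: t); rw [hpd] at this; simp at this
          | cons c u => exact ⟨c, u, rfl⟩
        rw [heads_eq3, hcu]
        conv_rhs => rw [heads_cons]
        simp

theorem a_eq_heads (y : List Int) (hy : y ≠ []) : finite_differences y = pvHeads y := by
  unfold finite_differences
  have h1 : y.length = (y.length - 1) + 1 := by cases y with
    | nil => exact absurd rfl hy
    | cons a t => simp
  have hlen : (PySem.List.pyRange 1 (y.length : Int) 1).length = y.length - 1 := by
    rw [PySem.List.length_pyRange_one]; omega
  rw [loop_inv (y.length - 1) y _ h1 _ hlen, headI_pyGetD]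
  cases y with
  | nil => exact absurd rfl hy
  | cons a t =>
    conv_rhs => rw [heads_cons]
    simp

-- ===== B-side: the in-place triangle produces the heads list =====

theorem pairDiffs_concat (C : List Int) (b : Int) (h : C ≠ []) :
    pvPairDiffs (C ++ [b]) = pvPairDiffs C ++ [b - C.getD (C.length - 1) 0] := by
  match C with
  | [a] => simp [pvPairDiffs]
  | a :: c :: t =>
    have := pairDiffs_concat (c :: t) b (by simp)
    simp only [List.cons_append, pvPairDiffs] at this ⊢
    rw [this]
    simp
    rfl

-- one backward inner pass over positions |P|+m … |P|+1 of P ++ C ++ T (|C| = m+1)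
-- turns C into C.headI :: pvPairDiffs C and leaves P and T alone
theorem inner_inv (m : Nat) (C P T : List Int) (hC : C.length = m + 1) :
    (PySem.List.pyRange ((P.length : Int) + m) ((P.length : Int)) (-1)).foldl
        pvIStep (P ++ C ++ T)
      = P ++ (C.headI :: pvPairDiffs C) ++ T := by
  induction m generalizing C T with
  | zero =>
    match C, hC with
    | [c], _ =>
      rw [PySem.List.pyRange_neg_one_eq_nil (by omega)]
      simp [pvPairDiffs]
  | succ m ih =>
    -- C = C' ++ [b] with |C'| = m + 1
    have hne : C ≠ [] := by intro h; rw [h] at hC; simp at hC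
    obtain ⟨C', b, hCb, hC'⟩ : ∃ C' b, C = C' ++ [b] ∧ C'.length = m + 1 := by
      refine ⟨C.dropLast, C.getLast hne, (List.dropLast_append_getLast hne).symm, ?_⟩
      rw [List.length_dropLast, hC]; omega
    have hC'ne : C' ≠ [] := by intro h; rw [h] at hC'; simp at hC'
    push_cast
    rw [PySem.List.pyRange_neg_one_cons (by omega), List.foldl_cons]
    -- the first update hits index |P| + (m+1), i.e. b
    have hfirst : pvIStep (P ++ C ++ T) ((P.length : Int) + (m + 1))
        = P ++ C' ++ ((b - C'.getD (C'.length - 1) 0) :: T) := by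
      subst hCb
      unfold pvIStep
      have e1 : ((P.length : Int) + (m + 1)) = ((P.length + (m + 1) : Nat) : Int) := by
        push_cast; ring
      have e2 : ((P.length : Int) + (m + 1) - 1) = ((P.length + m : Nat) : Int) := by
        push_cast; ring
      rw [e2, e1, PySem.List.pyGetD_natCast, PySem.List.pyGetD_natCast,
        PySem.List.pySetD_natCast]
      have hb : (P ++ (C' ++ [b]) ++ T).getD (P.length + (m + 1)) 0 = b := by
        rw [List.append_assoc, List.getD_append_right _ _ _ _ (by omega)]
        have : P.length + (m + 1) - P.length = m + 1 := by omega
        rw [this, List.getD_append _ _ _ _ (by omega)]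
        have : m + 1 = C'.length := hC'.symm
        rw [this]
        simp
      have ha : (P ++ (C' ++ [b]) ++ T).getD (P.length + m) 0
          = C'.getD (C'.length - 1) 0 := by
        rw [List.append_assoc, List.getD_append_right _ _ _ _ (by omega)]
        have : P.length + m - P.length = m := by omega
        rw [this, List.getD_append _ _ _ _ (by omega), List.getD_append _ _ _ _ (by omega), hC']
        simp
      have hset : (P ++ (C' ++ [b]) ++ T).set (P.length + (m + 1))
            (b - C'.getD (C'.length - 1) 0)
          = P ++ C' ++ ((b - C'.getD (C'.length - 1) 0) :: T) := by
        rw [List.append_assoc, List.set_append_right _ _ (by omega)]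
        have h9 : P.length + (m + 1) - P.length = m + 1 := by omega
        rw [h9, List.append_assoc, List.set_append_right _ _ (by omega)]
        have h10 : m + 1 - C'.length = 0 := by omega
        rw [h10]
        simp
      rw [hb, ha, hset]
    rw [hfirst]
    have e3 : ((P.length : Int) + (m + 1) - 1) = ((P.length : Int) + m) := by ring
    have hih := ih C' ((b - C'.getD (C'.length - 1) 0) :: T) hC'
    push_cast at hih
    rw [e3, hih]
    subst hCb
    rw [pairDiffs_concat C' b hC'ne]
    cases C' with
    | nil => exact absurd rfl hC'ne
    | cons a t => simp

-- the outer loop: processing k = |P|+1 … |P|+|C|-1 on P ++ C yields P ++ pvHeads C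
theorem outer_inv (m : Nat) (C P : List Int) (hC : C.length = m + 1) :
    (PySem.List.pyRange ((P.length : Int) + 1) ((P.length : Int) + C.length) 1).foldl
        (fun d k =>
          (PySem.List.pyRange ((P.length : Int) + (C.length : Int) - 1) (k - 1) (-1)).foldl
            pvIStep d) (P ++ C)
      = P ++ pvHeads C := by
  induction m generalizing C P with
  | zero =>
    match C, hC with
    | [c], _ =>
      rw [PySem.List.pyRange_one_eq_nil (by simp)]
      simp [heads_single]
  | succ m ih =>
    have hne : C ≠ [] := by intro h; rw [h] at hC; simp at hC
    obtain ⟨c, u, rfl⟩ : ∃ c u, C = c :: u := by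
      cases C with
      | nil => exact absurd rfl hne
      | cons c u => exact ⟨c, u, rfl⟩
    rw [PySem.List.pyRange_one_cons (by simp at hC ⊢; omega), List.foldl_cons]
    have e1 : ((P.length : Int) + 1 - 1) = ((P.length : Int)) := by ring
    rw [e1]
    have hin := inner_inv (m + 1) (c :: u) P [] hC
    push_cast at hin
    rw [show ((P.length : Int) + ((m : Int) + 1)) = (P.length : Int) + ((c :: u).length : Int) - 1
        from by simp [hC]; ring] at hin
    simp only [List.append_nil] at hin
    rw [show P ++ (c :: u).headI :: pvPairDiffs (c :: u)
          = (P ++ [(c :: u).headI]) ++ pvPairDiffs (c :: u) from by simp] at hin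
    rw [hin]
    have hpd : (pvPairDiffs (c :: u)).length = m + 1 := by
      rw [pvPairDiffs_length, hC]; omega
    have hih := ih (pvPairDiffs (c :: u)) (P ++ [(c :: u).headI]) hpd
    have e3 : (((P ++ [(c :: u).headI]).length : Int) + 1) = ((P.length : Int) + 1 + 1) := by
      simp
    have e4 : (((P ++ [(c :: u).headI]).length : Int) + ((pvPairDiffs (c :: u)).length : Int))
        = ((P.length : Int) + (((c :: u).length : Int))) := by
      rw [hpd, hC]; push_cast; simp; ring
    rw [e3, e4] at hih
    rw [hih]
    cases u with
    | nil => simp at hC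
    | cons b t => rw [heads_eq3]; simp

theorem b_eq_heads (y : List Int) : finite_differences_alt y = pvHeads y := by
  unfold finite_differences_alt
  dsimp only
  cases y with
  | nil => rw [PySem.List.pyRange_one_eq_nil (by simp)]; simp [pvHeads]
  | cons a t =>
    have h := outer_inv t.length (a :: t) [] (by simp)
    simpa using h

-- ===== VERDICT (by name: the statement is the Claim_ definition above) =====
theorem finite_differences_spec : Claim_equal_finite_differences := by
  intro y _ hpre
  unfold Spec_finite_differences
  rw [a_eq_heads y hpre, b_eq_heads y]
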